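-- pv_equiv track=rewrite | github.com/Young-Ho-Boss/parallel | 1.py | build_sigma_masks
-- ===== SOURCE A (Python) =====
-- def build_sigma_masks(D: int):
--     n = D*D
--     masks = {}
--     for k in range(-D+1, D):
--         m = [0]*n
--         if k >= 0:
--             # 0 <= ell - D*k < D-k
--             base = D*k
--             for ell in range(base, base + (D - k)):
--                 if 0 <= ell < n:
--                     m[ell] = 1
--         else:
--             # -k <= ell - (D+k)*D < D
--             base = (D + k) * D
--             lo, hi = base + (-k), base + D
--             for ell in range(max(0, lo), min(n, hi)):
--                 m[ell] = 1
--         masks[k] = m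
--     return masks  # dict: k -> mask
-- ===== SOURCE B (Python) =====
-- def build_sigma_masks(D: int):
--     # per-cell indicator: each flat index ell belongs to diagonal k = i if i+j < D else i - D
--     n = D * D
--
--     def owner(ell):
--         i, j = ell // D, ell % D
--         return i if i + j < D else i - D
--
--     return {k: [1 if owner(ell) == k else 0 for ell in range(n)]
--             for k in range(-D + 1, D)}
-- ===== Notes on version B (the rewrite author's own statement) =====
-- stated objective: alternative
-- what changed: A fills each diagonal's mask by computing a contiguous flat-index interval per key (two branch cases with clamping); B instead tests every cell once per key with a per-cell owner function (k = i if i+j < D else i-D) in a dict-of-list comprehensions, with no interval arithmetic or in-place mutation.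
import Mathlib
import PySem

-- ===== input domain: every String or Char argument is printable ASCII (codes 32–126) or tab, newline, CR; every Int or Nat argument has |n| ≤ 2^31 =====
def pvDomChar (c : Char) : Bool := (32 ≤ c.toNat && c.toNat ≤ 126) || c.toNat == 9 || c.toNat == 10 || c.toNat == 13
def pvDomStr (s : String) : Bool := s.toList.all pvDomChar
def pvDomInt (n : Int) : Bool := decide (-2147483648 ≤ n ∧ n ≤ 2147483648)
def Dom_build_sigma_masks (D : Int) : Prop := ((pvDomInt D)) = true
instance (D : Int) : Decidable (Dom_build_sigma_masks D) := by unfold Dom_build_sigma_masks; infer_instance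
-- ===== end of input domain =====

-- B replaces A's per-diagonal contiguous interval fills by a per-cell owner test (alternative decomposition, same cost).

-- ===== PORT A =====
-- the mask built for key k in A's loop body
def pvAmask (D k : Int) : List Int :=
  let n := D * D
  let m : List Int := List.replicate n.toNat 0
  if k ≥ 0 then
    let base := D * k
    (PySem.List.pyRange base (base + (D - k)) 1).foldl
      (fun m ell => if 0 ≤ ell ∧ ell < n then PySem.List.pySetD m ell 1 else m) m
  else
    let base := (D + k) * D
    let lo := base + (-k)
    let hi := base + D
    (PySem.List.pyRange (max 0 lo) (min n hi) 1).foldl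
      (fun m ell => PySem.List.pySetD m ell 1) m

def build_sigma_masks (D : Int) : List (Int × List Int) :=
  ((PySem.List.pyRange (-D + 1) D 1).foldl
    (fun d k => d.insert k (pvAmask D k)) PySem.Dict.empty).items

-- ===== PORT B =====
def pvOwner (D ell : Int) : Int :=
  let i := PySem.Int.floordiv ell D
  let j := PySem.Int.mod ell D
  if i + j < D then i else i - D

def build_sigma_masks_alt (D : Int) : List (Int × List Int) :=
  let n := D * D
  ((PySem.List.pyRange (-D + 1) D 1).foldl
    (fun d k => d.insert k
      ((PySem.List.pyRange 0 n 1).map (fun ell => if pvOwner D ell = k then (1 : Int) else 0)))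
    PySem.Dict.empty).items

-- ===== PRECONDITION & SPEC =====
def Spec_build_sigma_masks (D : Int) (out : List (Int × List Int)) : Prop := out = build_sigma_masks_alt D
instance (D : Int) (out : List (Int × List Int)) : Decidable (Spec_build_sigma_masks D out) := by unfold Spec_build_sigma_masks; infer_instance

-- ===== CLAIM (what is proved, stated in full; the proofs are below) =====
def Claim_equal_build_sigma_masks : Prop := ∀ (D : Int), Dom_build_sigma_masks D → Spec_build_sigma_masks D (build_sigma_masks D)

-- ===== LEMMAS AND PROOFS =====

-- setting one position of a map-over-range is a pointwise-if map (also when j is out of range: both sides unchanged)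
lemma pv_set_map_range (n : Nat) (g : Nat → Int) (j : Nat) (v : Int) :
    ((List.range n).map g).set j v = (List.range n).map (fun idx => if idx = j then v else g idx) := by
  apply List.ext_getElem
  · simp
  · intro i h1 h2
    simp only [List.getElem_set, List.getElem_map, List.getElem_range]
    by_cases hij : j = i <;> simp [hij, eq_comm]

-- the interval-fill loop turns a map-over-range into a map with an interval indicator
lemma pv_fill_map (n : Nat) (b : Int) :
    ∀ (t : Nat) (a : Int) (g : Nat → Int), t = (b - a).toNat → 0 ≤ a →
      (PySem.List.pyRange a b 1).foldl (fun m ell => PySem.List.pySetD m ell 1)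
          ((List.range n).map g) =
        (List.range n).map (fun (idx : Nat) => if a ≤ (idx : Int) ∧ (idx : Int) < b then 1 else g idx) := by
  intro t
  induction t with
  | zero =>
    intro a g ht ha
    rw [PySem.List.pyRange_one_eq_nil (by omega)]
    simp only [List.foldl_nil]
    apply List.map_congr_left
    intro idx _
    have : ¬ (a ≤ (idx : Int) ∧ (idx : Int) < b) := by omega
    simp [this]
  | succ t ih =>
    intro a g ht ha
    rw [PySem.List.pyRange_one_cons (by omega)]
    simp only [List.foldl_cons]
    rw [PySem.List.pySetD_of_nonneg _ _ ha, pv_set_map_range]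
    rw [ih (a + 1) _ (by omega) (by omega)]
    apply List.map_congr_left
    intro idx _
    have hcast : ((idx : Int) = a) ↔ (idx = a.toNat) := by omega
    by_cases h1 : (idx : Int) = a
    · have hb : a < b := by omega
      simp [hcast.mp h1, hb]
      omega
    · have h2 : idx ≠ a.toNat := by omega
      simp only [h2, if_false]
      split_ifs <;> first | rfl | omega

-- D*x monotone for positive D
lemma pv_mul_mono (D x y : Int) (hD : 0 < D) (h : x ≤ y) : D * x ≤ D * y :=
  mul_le_mul_of_nonneg_left h hD.le

-- decomposition of a flat index: pvOwner in terms of quotient and remainder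
lemma pv_owner_decomp (D ell : Int) (hD : 0 < D) (hell : 0 ≤ ell) :
    ∃ i j : Int, ell = D * i + j ∧ 0 ≤ j ∧ j < D ∧ 0 ≤ i ∧
      pvOwner D ell = (if i + j < D then i else i - D) := by
  refine ⟨PySem.Int.floordiv ell D, PySem.Int.mod ell D, ?_, ?_, ?_, ?_, rfl⟩
  · have := PySem.Int.floordiv_mul_add_mod ell D
    linarith [this, mul_comm (PySem.Int.floordiv ell D) D]
  · rw [PySem.Int.mod_eq_emod_of_pos hD]; exact Int.emod_nonneg ell (by omega)
  · rw [PySem.Int.mod_eq_emod_of_pos hD]; exact Int.emod_lt_of_pos ell hD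
  · rw [PySem.Int.floordiv_eq_ediv_of_pos hD]; exact Int.ediv_nonneg hell hD.le

-- characterization, k ≥ 0: owner = k on exactly the interval [D*k, D*k + (D-k))
lemma pv_owner_iff_nonneg (D k ell : Int) (hD : 0 < D) (hk : 0 ≤ k)
    (hell : 0 ≤ ell) (helln : ell < D * D) :
    (pvOwner D ell = k) ↔ (D * k ≤ ell ∧ ell < D * k + (D - k)) := by
  obtain ⟨i, j, hdec, hj0, hjD, hi0, hown⟩ := pv_owner_decomp D ell hD hell
  have hiD : i < D := by
    by_contra h
    have : D * D ≤ D * i := pv_mul_mono D D i hD (by omega)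
    omega
  rw [hown]
  constructor
  · intro h
    split_ifs at h with hb
    · have hDk : D * i = D * k := by rw [h]
      omega
    · exfalso; omega
  · rintro ⟨h1, h2⟩
    have hik : i = k := by
      rcases lt_trichotomy i k with h | h | h
      · have : D * (i + 1) ≤ D * k := pv_mul_mono D (i + 1) k hD (by omega)
        rw [mul_add] at this; omega
      · exact h
      · have : D * (k + 1) ≤ D * i := pv_mul_mono D (k + 1) i hD (by omega)
        rw [mul_add] at this; omega
    have hDk : D * i = D * k := by rw [hik]
    have hb : i + j < D := by omega
    simp only [if_pos hb]
    exact hik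

-- characterization, k < 0: owner = k on exactly the interval [(D+k)*D - k, (D+k)*D + D)
lemma pv_owner_iff_neg (D k ell : Int) (hD : 0 < D) (hk : k < 0)
    (hell : 0 ≤ ell) (helln : ell < D * D) :
    (pvOwner D ell = k) ↔ ((D + k) * D + (-k) ≤ ell ∧ ell < (D + k) * D + D) := by
  obtain ⟨i, j, hdec, hj0, hjD, hi0, hown⟩ := pv_owner_decomp D ell hD hell
  have hiD : i < D := by
    by_contra h
    have : D * D ≤ D * i := pv_mul_mono D D i hD (by omega)
    omega
  have hcomm : (D + k) * D = D * (D + k) := mul_comm _ _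
  rw [hown]
  constructor
  · intro h
    split_ifs at h with hb
    · exfalso; omega
    · have hik : i = D + k := by omega
      have hDk : D * i = D * (D + k) := by rw [hik]
      rw [hcomm]
      omega
  · rintro ⟨h1, h2⟩
    rw [hcomm] at h1 h2
    have hik : i = D + k := by
      rcases lt_trichotomy i (D + k) with h | h | h
      · have : D * (i + 1) ≤ D * (D + k) := pv_mul_mono D (i + 1) (D + k) hD (by omega)
        rw [mul_add] at this; omega
      · exact h
      · have : D * (D + k + 1) ≤ D * i := pv_mul_mono D (D + k + 1) i hD (by omega)
        rw [mul_add] at this; omega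
    have hDk : D * i = D * (D + k) := by rw [hik]
    have hb : ¬ (i + j < D) := by omega
    simp only [if_neg hb]
    omega

-- B's mask for key k as a map over List.range
lemma pv_bmask_eq (D k : Int) :
    (PySem.List.pyRange 0 (D * D) 1).map (fun ell => if pvOwner D ell = k then (1 : Int) else 0) =
      (List.range (D * D).toNat).map
        (fun (idx : Nat) => if pvOwner D (idx : Int) = k then (1 : Int) else 0) := by
  rw [PySem.List.pyRange_one, List.map_map]
  simp only [Int.sub_zero]
  apply List.map_congr_left
  intro idx _
  simp

-- per-key equality of the two masks
lemma pv_mask_eq (D k : Int) (hD : 0 < D) (hk2 : k < D) :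
    pvAmask D k =
      (PySem.List.pyRange 0 (D * D) 1).map (fun ell => if pvOwner D ell = k then (1 : Int) else 0) := by
  rw [pv_bmask_eq D k]
  have hrepl : (List.replicate (D * D).toNat (0 : Int)) =
      (List.range (D * D).toNat).map (fun _ => (0 : Int)) := by
    simp [List.map_const']
  have hidx : ∀ idx ∈ List.range (D * D).toNat, (0 : Int) ≤ (idx : Int) ∧ (idx : Int) < D * D := by
    intro idx hmem
    rw [List.mem_range] at hmem
    constructor
    · exact_mod_cast Nat.zero_le idx
    · have : (idx : Int) < ((D * D).toNat : Int) := by exact_mod_cast hmem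
      omega
  unfold pvAmask
  simp only []
  split_ifs with hkpos
  · -- k ≥ 0: guarded fill over [D*k, D*k + (D - k))
    rw [PySem.List.foldl_congr_mem
        (g := fun m ell => PySem.List.pySetD m ell 1)
        (h := by
          intro acc x hx
          rw [PySem.List.mem_pyRange_one] at hx
          have hx2 : 0 ≤ x ∧ x < D * D := by
            constructor
            · nlinarith
            · nlinarith
          simp [hx2])]
    rw [hrepl, pv_fill_map (D * D).toNat (D * k + (D - k)) _ (D * k) _ rfl (by positivity)]
    apply List.map_congr_left
    intro idx hmem
    obtain ⟨h0, hn⟩ := hidx idx hmem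
    exact (if_congr (pv_owner_iff_nonneg D k (idx : Int) hD hkpos h0 hn) rfl rfl).symm
  · -- k < 0: fill over [max 0 lo, min n hi)
    rw [hrepl, pv_fill_map (D * D).toNat _ _ _ _ rfl (le_max_left 0 _)]
    apply List.map_congr_left
    intro idx hmem
    obtain ⟨h0, hn⟩ := hidx idx hmem
    have hmm : (max 0 ((D + k) * D + -k) ≤ (idx : Int) ∧ (idx : Int) < min (D * D) ((D + k) * D + D)) ↔
        ((D + k) * D + -k ≤ (idx : Int) ∧ (idx : Int) < (D + k) * D + D) := by omega
    exact if_congr (hmm.trans (pv_owner_iff_neg D k (idx : Int) hD (by omega) h0 hn).symm) rfl rfl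

-- ===== VERDICT (by name: the statement is the Claim_ definition above) =====
theorem build_sigma_masks_spec : Claim_equal_build_sigma_masks := by
  intro D _
  unfold Spec_build_sigma_masks build_sigma_masks build_sigma_masks_alt
  by_cases hD : 0 < D
  · congr 1
    apply PySem.List.foldl_congr_mem
    intro acc k hk
    rw [PySem.List.mem_pyRange_one] at hk
    rw [pv_mask_eq D k hD (by omega)]
  · rw [PySem.List.pyRange_one_eq_nil (by omega)]
    rfl
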